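-- pv_equiv track=rewrite | github.com/thecount12/pyinterview | water.py | water
-- ===== SOURCE A (Python) =====
-- def water(data, x, y):
--     height = []
--     width = []
--     for i, num in enumerate(data):
--         if num == x:
--             height.append(x)
--             width.append(i)
--         if num == y:
--             height.append(y)
--             width.append(i)
--     volume = min(height) * (max(width)-min(width))
--     return volume
-- ===== SOURCE B (Python) =====
-- def water(data, x, y):
--     first = minv = last = None
--     for i, num in enumerate(data):
--         if num == x or num == y:
--             if first is None:
--                 first, minv = i, num
--             elif num < minv:
--                 minv = num
--             last = i
--     return minv * (last - first)
-- ===== Notes on version B (the rewrite author's own statement) =====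
-- stated objective: simpler
-- what changed: B replaces A's two accumulated lists plus three separate min/max reduction passes with a single pass over enumerate(data) maintaining three scalar accumulators (first match index, running minimum matched value, last match index).
import Mathlib
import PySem

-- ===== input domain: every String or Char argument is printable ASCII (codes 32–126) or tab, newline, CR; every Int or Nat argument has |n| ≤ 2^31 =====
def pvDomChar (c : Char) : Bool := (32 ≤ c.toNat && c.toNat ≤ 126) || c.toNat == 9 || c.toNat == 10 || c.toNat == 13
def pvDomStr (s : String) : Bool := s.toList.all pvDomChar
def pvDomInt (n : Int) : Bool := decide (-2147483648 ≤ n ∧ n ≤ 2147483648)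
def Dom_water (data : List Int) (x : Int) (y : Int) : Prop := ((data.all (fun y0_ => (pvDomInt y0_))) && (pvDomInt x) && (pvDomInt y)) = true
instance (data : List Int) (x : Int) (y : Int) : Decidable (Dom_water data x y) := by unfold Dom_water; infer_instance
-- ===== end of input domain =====

-- B does one pass with three scalar accumulators instead of A's two lists plus
-- three reduction passes; return values agree wherever A returns (both raise when
-- no element matches x or y — excluded by Pre_water).

-- ===== PORT A =====
def stepA (x y : Int) (hw : List Int × List Int) (p : Int × Int) : List Int × List Int :=
  let hw1 := if p.2 = x then (hw.1 ++ [x], hw.2 ++ [p.1]) else hw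
  if p.2 = y then (hw1.1 ++ [y], hw1.2 ++ [p.1]) else hw1

def water (data : List Int) (x : Int) (y : Int) : Int :=
  let hw := (PySem.List.enumerate data).foldl (stepA x y) ([], [])
  -- Python raises ValueError on min([]) when nothing matched; Pre_water excludes that,
  -- the port returns 0 via getD there.
  ((PySem.List.min? hw.1 (fun a => a)).getD 0) *
    (((PySem.List.max? hw.2 (fun a => a)).getD 0) - ((PySem.List.min? hw.2 (fun a => a)).getD 0))

-- ===== PORT B =====
-- state: none before the first match; some (first, minv, last) afterwards
def stepB (x y : Int) (s : Option (Int × Int × Int)) (p : Int × Int) : Option (Int × Int × Int) :=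
  if p.2 = x ∨ p.2 = y then
    match s with
    | none => some (p.1, p.2, p.1)
    | some (f, m, _) => some (f, if p.2 < m then p.2 else m, p.1)
  else s

def water_alt (data : List Int) (x : Int) (y : Int) : Int :=
  match (PySem.List.enumerate data).foldl (stepB x y) none with
  | some (f, m, l) => m * (l - f)
  | none => 0   -- Python Source B raises TypeError here; excluded by Pre_water

-- ===== PRECONDITION & SPEC =====
-- Pre_water: some element of data equals x or y; otherwise A raises ValueError (min of empty list).
def Pre_water (data : List Int) (x : Int) (y : Int) : Prop := ∃ v ∈ data, v = x ∨ v = y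
instance (data : List Int) (x : Int) (y : Int) : Decidable (Pre_water data x y) := by
  unfold Pre_water; infer_instance
def pvWitness_water : List Int × Int × Int := ([1, 5, 1], 1, 1)

def Spec_water (data : List Int) (x : Int) (y : Int) (out : Int) : Prop := out = water_alt data x y
instance (data : List Int) (x : Int) (y : Int) (out : Int) : Decidable (Spec_water data x y out) := by
  unfold Spec_water; infer_instance

-- ===== CLAIM (what is proved, stated in full; the proofs are below) =====
def Claim_equal_water : Prop := ∀ (data : List Int) (x : Int) (y : Int), Dom_water data x y → Pre_water data x y → Spec_water data x y (water data x y)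

-- ===== LEMMAS AND PROOFS =====

-- invariant relating A's list state to B's scalar state after processing indices < k
def WaterInv (k : Int) (hw : List Int × List Int) (s : Option (Int × Int × Int)) : Prop :=
  match s with
  | none => hw.1 = [] ∧ hw.2 = []
  | some (f, m, l) =>
      PySem.List.min? hw.1 (fun a => a) = some m ∧
      PySem.List.min? hw.2 (fun a => a) = some f ∧
      PySem.List.max? hw.2 (fun a => a) = some l ∧
      (∀ j ∈ hw.2, j < k)

lemma min?_id_append (xs : List Int) (m v : Int)
    (h : PySem.List.min? xs (fun a => a) = some m) :
    PySem.List.min? (xs ++ [v]) (fun a => a) = some (min m v) := by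
  cases xs with
  | nil => exact absurd (PySem.List.min?_mem h) (by simp)
  | cons a t =>
    simp only [PySem.List.min?_id_cons, Option.some.injEq] at h
    subst h
    simp [List.cons_append, PySem.List.min?_id_cons, List.foldl_append]
lemma max?_id_append (xs : List Int) (m v : Int)
    (h : PySem.List.max? xs (fun a => a) = some m) :
    PySem.List.max? (xs ++ [v]) (fun a => a) = some (max m v) := by
  cases xs with
  | nil => exact absurd (PySem.List.max?_mem h) (by simp)
  | cons a t =>
    simp only [PySem.List.max?_id_cons, Option.some.injEq] at h
    subst h
    simp [List.cons_append, PySem.List.max?_id_cons, List.foldl_append]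

lemma inv_step (x y k v : Int) (hw : List Int × List Int) (s : Option (Int × Int × Int))
    (h : WaterInv k hw s) : WaterInv (k + 1) (stepA x y hw (k, v)) (stepB x y s (k, v)) := by
  cases s with
  | none =>
    obtain ⟨h1, h2⟩ := h
    obtain ⟨hl, hr⟩ := hw
    simp only at h1 h2; subst h1; subst h2
    by_cases hx : v = x <;> by_cases hy : v = y
    · have hxy : x = y := hx.symm.trans hy
      simp [WaterInv, stepA, stepB, hx, hy, hxy, PySem.List.min?_id_cons, PySem.List.max?_id_cons]
    · have hxy : ¬ x = y := fun hq => hy (hx.trans hq)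
      simp [WaterInv, stepA, stepB, hx, hy, hxy, PySem.List.min?_id_cons, PySem.List.max?_id_cons]
    · have hxy : ¬ y = x := fun hq => hx (hy.trans hq)
      simp [WaterInv, stepA, stepB, hx, hy, hxy, PySem.List.min?_id_cons, PySem.List.max?_id_cons]
    · simp [WaterInv, stepA, stepB, hx, hy]
  | some t =>
    obtain ⟨f, m, l⟩ := t
    obtain ⟨hm, hf, hl, hb⟩ := h
    have hfm : f ∈ hw.2 := PySem.List.min?_mem hf
    have hlm : l ∈ hw.2 := PySem.List.max?_mem hl
    have hfk : f < k := hb f hfm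
    have hlk : l < k := hb l hlm
    by_cases hx : v = x <;> by_cases hy : v = y
    · have hxy : x = y := hx.symm.trans hy
      simp only [WaterInv, stepA, stepB, hx, hy, hxy, if_pos rfl, or_self, if_true]
      refine ⟨?_, ?_, ?_, ?_⟩
      · rw [min?_id_append _ _ _ (min?_id_append _ _ _ hm)]
        congr 1; simp only [min_def]; split_ifs <;> omega
      · rw [min?_id_append _ _ _ (min?_id_append _ _ _ hf)]
        congr 1; simp only [min_def]; split_ifs <;> omega
      · rw [max?_id_append _ _ _ (max?_id_append _ _ _ hl)]
        congr 1; simp only [max_def]; split_ifs <;> omega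
      · intro j hj; simp at hj
        have hc : j ∈ hw.2 ∨ j = k := by tauto
        rcases hc with hc | hc
        · have := hb j hc; omega
        · omega
    · have hxy : ¬ x = y := fun hq => hy (hx.trans hq)
      simp only [WaterInv, stepA, stepB, hx, hy, if_pos rfl, if_neg hxy, true_or, if_true]
      refine ⟨?_, ?_, ?_, ?_⟩
      · rw [min?_id_append _ _ _ hm]
        congr 1; simp only [min_def]; split_ifs <;> omega
      · rw [min?_id_append _ _ _ hf]
        congr 1; simp only [min_def]; split_ifs <;> omega
      · rw [max?_id_append _ _ _ hl]
        congr 1; simp only [max_def]; split_ifs <;> omega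
      · intro j hj; simp at hj
        have hc : j ∈ hw.2 ∨ j = k := by tauto
        rcases hc with hc | hc
        · have := hb j hc; omega
        · omega
    · have hxy : ¬ y = x := fun hq => hx (hy.trans hq)
      simp only [WaterInv, stepA, stepB, hx, hy, if_neg (by exact fun hq => hx (hy ▸ hq)), if_pos rfl, or_true, if_true]
      refine ⟨?_, ?_, ?_, ?_⟩
      · rw [min?_id_append _ _ _ hm]
        congr 1; simp only [min_def]; split_ifs <;> omega
      · rw [min?_id_append _ _ _ hf]
        congr 1; simp only [min_def]; split_ifs <;> omega
      · rw [max?_id_append _ _ _ hl]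
        congr 1; simp only [max_def]; split_ifs <;> omega
      · intro j hj; simp at hj
        have hc : j ∈ hw.2 ∨ j = k := by tauto
        rcases hc with hc | hc
        · have := hb j hc; omega
        · omega
    · simp only [WaterInv, stepA, stepB, hx, hy, if_neg, or_self, if_false]
      exact ⟨hm, hf, hl, fun j hj => by have := hb j hj; omega⟩

lemma inv_fold (data : List Int) (x y : Int) : ∀ (k : Int) (hw : List Int × List Int)
    (s : Option (Int × Int × Int)), WaterInv k hw s →
    WaterInv (k + data.length) ((PySem.List.enumerate data k).foldl (stepA x y) hw)
      ((PySem.List.enumerate data k).foldl (stepB x y) s) := by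
  induction data with
  | nil => intro k hw s h; simpa [PySem.List.enumerate] using h
  | cons a t ih =>
    intro k hw s h
    rw [PySem.List.enumerate_cons]
    simp only [List.foldl_cons]
    have hstep := ih (k + 1) (stepA x y hw (k, a)) (stepB x y s (k, a)) (inv_step x y k a hw s h)
    have heq : k + ((a :: t).length : Int) = (k + 1) + (t.length : Int) := by
      simp only [List.length_cons]; push_cast; ring
    rw [heq]
    exact hstep

lemma stepB_isSome (x y : Int) (s : Option (Int × Int × Int)) (p : Int × Int)
    (h : s.isSome) : (stepB x y s p).isSome := by
  cases s with
  | none => simp at h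
  | some t => obtain ⟨f, m, l⟩ := t; simp only [stepB]; split <;> simp

lemma stepB_match_isSome (x y : Int) (s : Option (Int × Int × Int)) (p : Int × Int)
    (h : p.2 = x ∨ p.2 = y) : (stepB x y s p).isSome := by
  cases s with
  | none => simp [stepB, h]
  | some t => obtain ⟨f, m, l⟩ := t; simp only [stepB]; split <;> simp

lemma foldl_stepB_isSome (x y : Int) (l : List (Int × Int)) :
    ∀ s, s.isSome → (l.foldl (stepB x y) s).isSome := by
  induction l with
  | nil => intro s h; simpa using h
  | cons p t ih => intro s h; exact ih _ (stepB_isSome x y s p h)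

lemma fold_stepB_ne_none (data : List Int) (x y : Int) (hpre : Pre_water data x y) :
    ((PySem.List.enumerate data).foldl (stepB x y) none).isSome := by
  obtain ⟨v, hv, hxy⟩ := hpre
  obtain ⟨l1, l2, rfl⟩ := List.append_of_mem hv
  rw [PySem.List.enumerate_append, List.foldl_append, PySem.List.enumerate_cons,
    List.foldl_cons]
  apply foldl_stepB_isSome
  exact stepB_match_isSome x y _ _ hxy

-- ===== VERDICT (by name: the statement is the Claim_ definition above) =====
theorem water_spec : Claim_equal_water := by
  intro data x y _hdom hpre
  unfold Spec_water water water_alt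
  have hinv := inv_fold data x y 0 ([], []) none (by exact ⟨rfl, rfl⟩)
  have hsome := fold_stepB_ne_none data x y hpre
  cases hs : (PySem.List.enumerate data).foldl (stepB x y) none with
  | none => rw [hs] at hsome; simp at hsome
  | some t =>
    obtain ⟨f, m, l⟩ := t
    rw [hs] at hinv
    obtain ⟨hm, hf, hl, _⟩ := hinv
    simp only [hs, hm, hf, hl, Option.getD_some]
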